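-- pv_equiv track=rewrite | github.com/ECHui156/TuringComplete | rule_110.py | next_row_fixed_dead
-- ===== SOURCE A (Python) =====
-- RULE110_TABLE: tuple[int, ...] = (
-- 	0,  # 000
-- 	1,  # 001
-- 	1,  # 010
-- 	1,  # 011
-- 	0,  # 100
-- 	1,  # 101
-- 	1,  # 110
-- 	0,  # 111
-- )
--
-- def next_row_fixed_dead(current: list[int]) -> list[int]:
-- 	"""基于 Rule 110 计算下一行（边界策略：边界外固定为 0/死细胞）。
--
-- 	说明：
-- 	- 这里采用“固定边界”为死细胞的策略；
-- 	- 对 i=0 时，left 视作 0；对 i=last 时，right 视作 0；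
-- 	- 中间位置正常读取左右邻居。
-- 	"""
-- 	width = len(current)
-- 	next_line = [0] * width
--
-- 	for i in range(width):
-- 		left = current[i - 1] if i > 0 else 0
-- 		center = current[i]
-- 		right = current[i + 1] if i < width - 1 else 0
--
-- 		# 3 比特邻域编码为 0..7：
-- 		# idx = (L C R)_2
-- 		idx = (left << 2) | (center << 1) | right
-- 		next_line[i] = RULE110_TABLE[idx]
--
-- 	return next_line
-- ===== SOURCE B (Python) =====
-- RULE110_TABLE: tuple[int, ...] = (0, 1, 1, 1, 0, 1, 1, 0)
--
-- def next_row_fixed_dead(current: list[int]) -> list[int]: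
--     # Streaming scan: carry the (left, center) window through one pass over the
--     # values, emitting each cell as the window slides, with a trailing flush for
--     # the last cell -- no index arithmetic, no boundary conditionals, no
--     # preallocated output row.
--     out = []
--     left = 0
--     center = 0
--     started = False
--     for right in current:
--         if started:
--             out.append(RULE110_TABLE[(left << 2) | (center << 1) | right])
--         left, center, started = center, right, True
--     if started:
--         out.append(RULE110_TABLE[(left << 2) | (center << 1)])
--     return out
-- ===== Notes on version B (the rewrite author's own statement) =====
-- stated objective: alternative
-- what changed: B replaces A's width-indexed loop (preallocated output, current[i-1]/current[i+1] reads, per-index boundary conditionals) by a streaming scan that carries the (left, center) window in accumulator state over the values, emitting as the window slides with a trailing flush for the last cell.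
import Mathlib
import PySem

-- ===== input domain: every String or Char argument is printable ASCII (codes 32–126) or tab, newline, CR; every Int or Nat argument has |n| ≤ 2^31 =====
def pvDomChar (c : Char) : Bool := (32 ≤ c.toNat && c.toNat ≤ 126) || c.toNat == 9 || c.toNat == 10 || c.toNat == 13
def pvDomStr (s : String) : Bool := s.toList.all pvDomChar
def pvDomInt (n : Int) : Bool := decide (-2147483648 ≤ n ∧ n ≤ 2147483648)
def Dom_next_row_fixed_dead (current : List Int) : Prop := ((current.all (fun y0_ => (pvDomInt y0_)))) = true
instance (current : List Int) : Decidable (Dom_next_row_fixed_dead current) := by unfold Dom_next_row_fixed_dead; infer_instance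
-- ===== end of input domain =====

-- B replaces A's width-indexed loop (preallocated output, current[i-1]/current[i+1]
-- reads, per-index boundary conditionals) by a streaming scan carrying the
-- (left, center) window in accumulator state, with a trailing flush (objective: alternative).

-- ===== PORT A =====
-- RULE110_TABLE
def pvTable : List Int := [0, 1, 1, 1, 0, 1, 1, 0]

def next_row_fixed_dead (current : List Int) : List Int :=
  (PySem.List.pyRange 0 (current.length : Int) 1).foldl
    (fun next_line i =>
      PySem.List.pySetD next_line i
        (PySem.List.pyGetD pvTable
          (PySem.Int.bor (PySem.Int.bor
            ((if 0 < i then PySem.List.pyGetD current (i - 1) 0 else 0) <<< 2)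
            ((PySem.List.pyGetD current i 0) <<< 1))
            (if i < (current.length : Int) - 1 then PySem.List.pyGetD current (i + 1) 0 else 0)) 0))
    (List.replicate current.length 0)

-- ===== PORT B =====
-- emitted value for window (l, c, r): RULE110_TABLE[(l << 2) | (c << 1) | r]
def pvE (l c r : Int) : Int :=
  PySem.List.pyGetD pvTable (PySem.Int.bor (PySem.Int.bor (l <<< 2) (c <<< 1)) r) 0

-- one loop iteration: emit (if the window is primed) and slide it
def pvStepB (st : List Int × Int × Int × Bool) (right : Int) : List Int × Int × Int × Bool :=
  match st with
  | (out, left, center, started) =>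
    ((if started then out ++ [pvE left center right] else out), center, right, true)

def next_row_fixed_dead_alt (current : List Int) : List Int :=
  match current.foldl pvStepB ([], 0, 0, false) with
  | (out, left, center, started) =>
    if started then
      out ++ [PySem.List.pyGetD pvTable (PySem.Int.bor (left <<< 2) (center <<< 1)) 0]
    else out

-- ===== PRECONDITION & SPEC =====
-- k-th cell of the dead-padded row [0] + current + [0]
def pvCell (c : List Int) (k : Nat) : Int := (([0] ++ c ++ [0]).getD k 0)

-- A's 3-bit neighbourhood code at cell k
def pvCode (c : List Int) (k : Nat) : Int :=
  PySem.Int.bor (PySem.Int.bor (pvCell c k <<< 2) (pvCell c (k + 1) <<< 1)) (pvCell c (k + 2))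

-- Pre_: every neighbourhood code is a valid Python index into the 8-entry rule table
-- (range -8..7); outside it A's table lookup raises IndexError.
def Pre_next_row_fixed_dead (current : List Int) : Prop :=
  ∀ k : Nat, k < current.length → PySem.Raise.InRange 8 (pvCode current k)
instance (current : List Int) : Decidable (Pre_next_row_fixed_dead current) := by
  unfold Pre_next_row_fixed_dead; infer_instance
def pvWitness_next_row_fixed_dead : List Int := [1, 0, 1, 1, 0]

def Spec_next_row_fixed_dead (current : List Int) (out : List Int) : Prop := out = next_row_fixed_dead_alt current
instance (current : List Int) (out : List Int) : Decidable (Spec_next_row_fixed_dead current out) := by unfold Spec_next_row_fixed_dead; infer_instance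

-- ===== CLAIM =====
def Claim_equal_next_row_fixed_dead : Prop := ∀ (current : List Int), Dom_next_row_fixed_dead current → Pre_next_row_fixed_dead current → Spec_next_row_fixed_dead current (next_row_fixed_dead current)

-- ===== LEMMAS AND PROOFS =====

-- value of the k-th output cell as A computes it
def pvG (c : List Int) (k : Nat) : Int := PySem.List.pyGetD pvTable (pvCode c k) 0

lemma pvCell_zero (c : List Int) : pvCell c 0 = 0 := rfl

lemma pvCell_succ (c : List Int) (k : Nat) : pvCell c (k + 1) = (c ++ [0]).getD k 0 := rfl

lemma pvCell_mid (c : List Int) (k : Nat) (h : k < c.length) : pvCell c (k + 1) = c.getD k 0 := by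
  rw [pvCell_succ, List.getD_append _ _ _ _ h]

lemma pvCell_last (c : List Int) : pvCell c (c.length + 1) = 0 := by
  rw [pvCell_succ, List.getD_append_right _ _ _ _ (le_refl _)]
  simp

-- ---------- A side: result = (range n).map (pvG c) ----------

lemma bodyval_eq (c : List Int) (m : Nat) (h : m < c.length) :
    PySem.List.pyGetD pvTable
      (PySem.Int.bor (PySem.Int.bor
        ((if 0 < (m : Int) then PySem.List.pyGetD c ((m : Int) - 1) 0 else 0) <<< 2)
        ((PySem.List.pyGetD c (m : Int) 0) <<< 1))
        (if (m : Int) < (c.length : Int) - 1 then PySem.List.pyGetD c ((m : Int) + 1) 0 else 0)) 0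
    = pvG c m := by
  unfold pvG pvCode
  congr 3
  · rcases Nat.eq_zero_or_pos m with hm | hm
    · subst hm; simp [pvCell_zero]
    · rw [if_pos (by exact_mod_cast hm),
        show ((m : Int) - 1) = ((m - 1 : Nat) : Int) by omega,
        PySem.List.pyGetD_natCast, ← pvCell_mid c (m - 1) (by omega),
        show m - 1 + 1 = m by omega]
  · rw [PySem.List.pyGetD_natCast, pvCell_mid c m h]
  · by_cases hm : m + 1 < c.length
    · rw [if_pos (by omega),
        show ((m : Int) + 1) = ((m + 1 : Nat) : Int) by omega,
        PySem.List.pyGetD_natCast, pvCell_mid c (m + 1) hm]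
    · rw [if_neg (by omega), show m + 2 = c.length + 1 by omega, pvCell_last]

lemma foldl_set_spec (c : List Int) :
    ∀ m, m ≤ c.length →
      (List.range m).foldl (fun nl (k : Nat) => PySem.List.pySetD nl (k : Int) (pvG c k))
          (List.replicate c.length 0)
        = ((List.range c.length).map (pvG c)).take m ++ List.replicate (c.length - m) 0 := by
  intro m
  induction m with
  | zero => simp
  | succ m ih =>
    intro hm
    rw [List.range_succ, List.foldl_append, ih (by omega)]
    simp only [List.foldl_cons, List.foldl_nil, PySem.List.pySetD_natCast]
    have hlen : (((List.range c.length).map (pvG c)).take m).length = m := by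
      simp; omega
    have hrep : List.replicate (c.length - m) (0 : Int)
        = 0 :: List.replicate (c.length - (m + 1)) 0 := by
      rw [show c.length - m = (c.length - (m + 1)) + 1 by omega]
      rfl
    rw [hrep, List.set_append_right _ _ (by omega), hlen, Nat.sub_self, List.set_cons_zero]
    rw [show ((List.range c.length).map (pvG c)).take (m + 1)
        = ((List.range c.length).map (pvG c)).take m ++ [pvG c m] by
      rw [List.take_add_one]
      simp [Nat.lt_of_succ_le hm]]
    simp

lemma a_eq_map (c : List Int) :
    next_row_fixed_dead c = (List.range c.length).map (pvG c) := by
  unfold next_row_fixed_dead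
  rw [PySem.List.pyRange_zero_natCast, List.foldl_map]
  apply Eq.trans (b := (List.range c.length).foldl
    (fun nl (k : Nat) => PySem.List.pySetD nl (k : Int) (pvG c k))
    (List.replicate c.length 0))
  · apply PySem.List.foldl_congr_mem
    intro acc x hx
    exact congrArg (PySem.List.pySetD acc (x : Int)) (bodyval_eq c x (List.mem_range.mp hx))
  · rw [foldl_set_spec c c.length (le_refl _)]
    simp

-- ---------- B side: the streaming scan ----------

-- outputs the scan still produces from window state (l, c) and remaining input
def pvWin (l c : Int) (rest : List Int) : List Int :=
  match rest with
  | [] => [pvE l c 0]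
  | r :: rs => pvE l c r :: pvWin c r rs

lemma pvWin_cons (a b x : Int) (xs : List Int) :
    pvWin a b (x :: xs) = pvE a b x :: pvWin b x xs := rfl

lemma fold_emit (l : List Int) : ∀ (out : List Int) (left center : Int),
    (match l.foldl pvStepB (out, left, center, true) with
      | (out, left, center, started) =>
        if started then
          out ++ [PySem.List.pyGetD pvTable (PySem.Int.bor (left <<< 2) (center <<< 1)) 0]
        else out)
    = out ++ pvWin left center l := by
  induction l with
  | nil =>
    intro out left center
    have h : pvWin left center []
        = [PySem.List.pyGetD pvTable (PySem.Int.bor (left <<< 2) (center <<< 1)) 0] := by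
      simp [pvWin, pvE]
    rw [h]
    rfl
  | cons r rs ih =>
    intro out left center
    rw [List.foldl_cons,
      show pvStepB (out, left, center, true) r = (out ++ [pvE left center r], center, r, true)
        from rfl,
      ih]
    simp [pvWin]

lemma win_eq (c : List Int) : ∀ n j, j < c.length → n = c.length - j →
    pvWin (pvCell c j) (pvCell c (j + 1)) (c.drop (j + 1))
      = (List.range n).map (fun i => pvE (pvCell c (j + i)) (pvCell c (j + i + 1)) (pvCell c (j + i + 2))) := by
  intro n
  induction n with
  | zero => intro j hj hn; omega
  | succ n ih =>
    intro j hj hn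
    rw [List.range_succ_eq_map, List.map_cons, List.map_map]
    by_cases hj1 : j + 1 < c.length
    · have hdd : c.drop (j + 1) = c.getD (j + 1) 0 :: c.drop (j + 2) := by
        rw [List.drop_eq_getElem_cons hj1, List.getD_eq_getElem _ _ hj1]
      have hc2 : c.getD (j + 1) 0 = pvCell c (j + 2) := by
        rw [show j + 2 = (j + 1) + 1 from rfl, pvCell_mid c (j + 1) hj1]
      rw [hdd, pvWin_cons, hc2, ih (j + 1) hj1 (by omega)]
      congr 1
      simp only [List.map_inj_left, Function.comp_apply]
      intro i hi
      rw [show j + 1 + i = j + i.succ by omega]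
    · have hn0 : n = 0 := by omega
      subst hn0
      have hdrop : c.drop (j + 1) = [] := List.drop_eq_nil_of_le (by omega)
      rw [hdrop]
      have hlast : pvCell c (j + 2) = 0 := by
        rw [show j + 2 = c.length + 1 by omega]; exact pvCell_last c
      simp [pvWin, hlast]

lemma b_eq_map (c : List Int) :
    next_row_fixed_dead_alt c
      = (List.range c.length).map (fun j => pvE (pvCell c j) (pvCell c (j + 1)) (pvCell c (j + 2))) := by
  cases c with
  | nil => rfl
  | cons c0 rest =>
    unfold next_row_fixed_dead_alt
    rw [List.foldl_cons,
      show pvStepB ([], 0, 0, false) c0 = ([], 0, c0, true) from rfl,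
      fold_emit rest [] 0 c0, List.nil_append,
      show pvWin 0 c0 rest
          = pvWin (pvCell (c0 :: rest) 0) (pvCell (c0 :: rest) (0 + 1)) ((c0 :: rest).drop (0 + 1))
        from rfl,
      win_eq (c0 :: rest) (c0 :: rest).length 0 (by simp) (by simp)]
    simp

-- ===== VERDICT =====
theorem next_row_fixed_dead_spec : Claim_equal_next_row_fixed_dead := by
  intro current _ _
  unfold Spec_next_row_fixed_dead
  rw [a_eq_map, b_eq_map]
  rfl
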